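-- pv_equiv track=rewrite | github.com/worldbank/geometatool | geometatool/utils.py | search_catchwords
-- ===== SOURCE A (Python) =====
-- def search_catchwords(string):
--     """
--     Splits String (at '_', '-' and '.' and searches for non-digit strings that
--     are longer than 2 characters.
--
--
--     Arguments:
--         string (string): The string to be searched.
--     """
--
--     #Exceptions that should not be considered Catchwords
--     exceptions = ['tif', 'aux', 'ref', 'etrs']
--
--     #Create empty list
--     Catchwords = []
--
--     #Split list at underscores
--     split_list_underscore = string.split('_')
--     for item in split_list_underscore:
--         #Split items in list at points
--         split_list_point = item.split('.')
--         for item in split_list_point: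
--             #Split items in list at hyphen
--             split_list = item.split('-')
--             for item in split_list:
--                 #Make all items lowercase to enable removing duplicates with list(set())
--                 item = item.lower()
--                 if not item in exceptions:
--                     #Do not consider items with digits as Catchwords
--                     if not item.isdigit():
--                         if not len(item)<3:
--                             Catchwords.append(item)
--
--     return Catchwords
-- ===== SOURCE B (Python) =====
-- def search_catchwords(string):
--     """Single left-to-right scan with a token buffer instead of three nested split loops."""
--     exceptions = {'tif', 'aux', 'ref', 'etrs'}
--     out = []
--     buf = []
--     for ch in string + '_':
--         if ch in '_.-':
--             tok = ''.join(buf).lower()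
--             buf = []
--             if tok not in exceptions and not tok.isdigit() and len(tok) >= 3:
--                 out.append(tok)
--         else:
--             buf.append(ch)
--     return out
-- ===== Notes on version B (the rewrite author's own statement) =====
-- stated objective: simpler
-- what changed: Replaces the three nested split loops (split on '_', then '.', then '-') by a single left-to-right scan with a token buffer that flushes at any delimiter, filtering each token once.
import Mathlib
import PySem

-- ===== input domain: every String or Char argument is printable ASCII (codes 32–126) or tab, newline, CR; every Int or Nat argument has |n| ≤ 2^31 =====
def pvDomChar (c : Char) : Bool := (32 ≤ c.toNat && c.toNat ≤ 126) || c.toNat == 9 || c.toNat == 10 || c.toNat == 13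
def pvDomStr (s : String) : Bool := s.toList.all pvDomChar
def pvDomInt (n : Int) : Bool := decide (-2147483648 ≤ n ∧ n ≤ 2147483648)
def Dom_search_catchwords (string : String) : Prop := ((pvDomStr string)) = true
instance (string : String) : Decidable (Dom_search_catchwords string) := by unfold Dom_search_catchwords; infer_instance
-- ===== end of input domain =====

-- B replaces A's three nested split loops by a single scan with a token buffer; objective: simpler.


-- ===== PORT A =====
-- triple nested split loops, transliterated (strings handled as their character lists; PySem.Chars.* are the Python-exact primitives)
def search_catchwords (string : String) : List String :=
  let exceptions : List (List Char) := ["tif".toList, "aux".toList, "ref".toList, "etrs".toList]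
  let split_list_underscore := PySem.Chars.splitOn string.toList ['_']
  split_list_underscore.foldl (fun acc item =>
    let split_list_point := PySem.Chars.splitOn item ['.']
    split_list_point.foldl (fun acc item =>
      let split_list := PySem.Chars.splitOn item ['-']
      split_list.foldl (fun acc item =>
        let item := PySem.Chars.lower item
        if !(exceptions.contains item) then
          if !(PySem.Chars.strIsdigit item) then
            if !(decide (item.length < 3)) then acc ++ [String.ofList item] else acc
          else acc
        else acc) acc) acc) []

-- ===== PORT B =====
-- single scan with a token buffer, flushed at any delimiter (port of Source B)
def search_catchwords_alt (string : String) : List String :=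
  let exceptions : List (List Char) := ["tif".toList, "aux".toList, "ref".toList, "etrs".toList]
  let step : List String × List Char → Char → List String × List Char := fun st ch =>
    if ['_', '.', '-'].contains ch then
      let tok := PySem.Chars.lower st.2
      (if !(exceptions.contains tok) && !(PySem.Chars.strIsdigit tok) && decide (3 ≤ tok.length)
         then st.1 ++ [String.ofList tok] else st.1, [])
    else (st.1, st.2 ++ [ch])
  ((string.toList ++ ['_']).foldl step ([], [])).1

-- ===== PRECONDITION & SPEC =====
def Spec_search_catchwords (string : String) (out : List String) : Prop := out = search_catchwords_alt string
instance (string : String) (out : List String) : Decidable (Spec_search_catchwords string out) := by unfold Spec_search_catchwords; infer_instance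

-- ===== CLAIM (what is proved, stated in full; the proofs are below) =====
def Claim_equal_search_catchwords : Prop := ∀ (string : String), Dom_search_catchwords string → Spec_search_catchwords string (search_catchwords string)

-- ===== LEMMAS AND PROOFS =====

-- split on every character satisfying p (head piece possibly empty, always at least one piece)
def splitP (p : Char → Bool) : List Char → List (List Char)
  | [] => [[]]
  | a :: rest =>
    if p a then [] :: splitP p rest
    else match splitP p rest with
         | [] => [[a]]          -- unreachable: splitP never returns []
         | t :: ts => (a :: t) :: ts

def mapHead (f : List Char → List Char) : List (List Char) → List (List Char)
  | [] => []
  | t :: ts => f t :: ts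

-- the token filter both programs apply, as a flatMap kernel
def pvEmit (t : List Char) : List String :=
  if !((["tif".toList, "aux".toList, "ref".toList, "etrs".toList] : List (List Char)).contains (PySem.Chars.lower t))
       && !(PySem.Chars.strIsdigit (PySem.Chars.lower t)) && decide (3 ≤ (PySem.Chars.lower t).length)
    then [String.ofList (PySem.Chars.lower t)] else []

def pvDelim (c : Char) : Bool := (c == '_') || ((c == '.') || (c == '-'))

lemma splitP_ne_nil (p : Char → Bool) (l : List Char) : splitP p l ≠ [] := by
  cases l with
  | nil => simp [splitP]
  | cons a rest =>
    simp only [splitP]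
    split_ifs
    · simp
    · cases h : splitP p rest <;> simp

lemma splitOn_go_eq (c : Char) :
    ∀ (fuel : Nat) (l cur : List Char) (acc : List (List Char)), l.length ≤ fuel →
      PySem.Chars.splitOn.go [c] fuel l cur acc
        = acc.reverse ++ mapHead (cur.reverse ++ ·) (splitP (· == c) l) := by
  intro fuel
  induction fuel with
  | zero =>
    intro l cur acc h
    have : l = [] := List.length_eq_zero_iff.mp (Nat.le_zero.mp h)
    subst this
    simp [PySem.Chars.splitOn.go, splitP, mapHead]
  | succ f ih =>
    intro l cur acc h
    cases l with
    | nil => simp [PySem.Chars.splitOn.go, splitP, mapHead]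
    | cons a rest =>
      by_cases hc : a = c
      · subst hc
        have hp : List.isPrefixOf [a] (a :: rest) = true := by simp [List.isPrefixOf]
        rw [show PySem.Chars.splitOn.go [a] (f+1) (a :: rest) cur acc
              = PySem.Chars.splitOn.go [a] f (List.drop 1 (a :: rest)) [] (cur.reverse :: acc) by
            simp [PySem.Chars.splitOn.go, hp]]
        rw [ih _ _ _ (by simpa using Nat.le_of_succ_le_succ h)]
        simp only [List.drop_succ_cons, List.drop_zero, splitP, beq_self_eq_true, if_pos]
        cases hsp : splitP (· == a) rest with
        | nil => exact absurd hsp (splitP_ne_nil _ _)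
        | cons t ts => simp [mapHead]
      · have hp : List.isPrefixOf [c] (a :: rest) = false := by
          simp [List.isPrefixOf]; exact fun h' => absurd h'.symm hc
        rw [show PySem.Chars.splitOn.go [c] (f+1) (a :: rest) cur acc
              = PySem.Chars.splitOn.go [c] f rest (a :: cur) acc by
            simp [PySem.Chars.splitOn.go, hp]]
        rw [ih _ _ _ (by simpa using Nat.le_of_succ_le_succ h)]
        simp only [splitP, beq_iff_eq, hc, if_neg, not_false_iff]
        cases hsp : splitP (· == c) rest with
        | nil => exact absurd hsp (splitP_ne_nil _ _)
        | cons t ts => simp [mapHead]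

lemma splitOn_single (c : Char) (l : List Char) :
    PySem.Chars.splitOn l [c] = splitP (· == c) l := by
  unfold PySem.Chars.splitOn
  rw [splitOn_go_eq c (l.length + 1) l [] [] (Nat.le_succ _)]
  cases hsp : splitP (· == c) l with
  | nil => exact absurd hsp (splitP_ne_nil _ _)
  | cons t ts => simp [mapHead]

-- splitting on p then re-splitting every piece on q = splitting on (p or q)
lemma splitP_flatMap (p q : Char → Bool) (l : List Char) :
    (splitP p l).flatMap (splitP q) = splitP (fun c => p c || q c) l := by
  induction l with
  | nil => simp [splitP]
  | cons a rest ih =>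
    simp only [splitP]
    by_cases hp : p a
    · simp only [hp, if_pos, Bool.true_or]
      simp [List.flatMap_cons, splitP, ← ih]
    · simp only [hp, Bool.false_or]
      cases hsp : splitP p rest with
      | nil => exact absurd hsp (splitP_ne_nil _ _)
      | cons t ts =>
        rw [hsp] at ih
        by_cases hq : q a
        · simp only [hq, if_pos]
          simp [List.flatMap_cons, splitP, hq, ← ih]
        · simp only [hq, Bool.false_eq_true, if_false]
          rw [← ih]
          cases hsq : splitP q t with
          | nil => exact absurd hsq (splitP_ne_nil _ _)
          | cons u us => simp [List.flatMap_cons, splitP, hq, hsq]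

-- a foldl whose step only appends is a flatMap
lemma foldl_acc_flatMap {α : Type} (g : α → List String) (step : List String → α → List String)
    (h : ∀ acc x, step acc x = acc ++ g x) :
    ∀ (l : List α) (acc : List String), l.foldl step acc = acc ++ l.flatMap g := by
  intro l
  induction l with
  | nil => simp
  | cons x xs ih => intro acc; rw [List.foldl_cons, h, ih, List.flatMap_cons, List.append_assoc]

lemma splitP_single_of_free (buf : List Char) (h : ∀ c ∈ buf, pvDelim c = false) :
    splitP pvDelim buf = [buf] := by
  induction buf with
  | nil => simp [splitP]
  | cons a rest ih =>
    have ha := h a (by simp)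
    have := ih (fun c hc => h c (by simp [hc]))
    simp [splitP, ha, this]

lemma splitP_append_delim (buf : List Char) (c : Char) (cs : List Char)
    (h : ∀ x ∈ buf, pvDelim x = false) (hc : pvDelim c = true) :
    splitP pvDelim (buf ++ c :: cs) = buf :: splitP pvDelim cs := by
  induction buf with
  | nil => simp [splitP, hc]
  | cons a rest ih =>
    have ha := h a (by simp)
    have := ih (fun x hx => h x (by simp [hx]))
    simp [splitP, ha, this]

lemma contains_eq_pvDelim (ch : Char) : (['_', '.', '-'].contains ch) = pvDelim ch := by
  show (ch == '_' || (ch == '.' || (ch == '-' || false))) = _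
  unfold pvDelim
  cases ch == '_' <;> cases ch == '.' <;> cases ch == '-' <;> rfl

-- A computes pvEmit over the flat token list
lemma A_eq_flatMap (s : String) :
    search_catchwords s = (splitP pvDelim s.toList).flatMap pvEmit := by
  unfold search_catchwords
  have hA3 : ∀ (acc : List String) (item : List Char),
      (fun acc (item : List Char) =>
        let item := PySem.Chars.lower item
        if !((["tif".toList, "aux".toList, "ref".toList, "etrs".toList] : List (List Char)).contains item) then
          if !(PySem.Chars.strIsdigit item) then
            if !(decide (item.length < 3)) then acc ++ [String.ofList item] else acc
          else acc
        else acc) acc item = acc ++ pvEmit item := by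
    intro acc item
    show (if !((["tif".toList, "aux".toList, "ref".toList, "etrs".toList] : List (List Char)).contains (PySem.Chars.lower item)) then
            if !(PySem.Chars.strIsdigit (PySem.Chars.lower item)) then
              if !(decide ((PySem.Chars.lower item).length < 3)) then acc ++ [String.ofList (PySem.Chars.lower item)] else acc
            else acc
          else acc) = acc ++ pvEmit item
    unfold pvEmit
    have hlen : (!(decide ((PySem.Chars.lower item).length < 3))) = decide (3 ≤ (PySem.Chars.lower item).length) := by
      by_cases h : (PySem.Chars.lower item).length < 3 <;> simp [h]
      omega
    rw [hlen]
    cases (["tif".toList, "aux".toList, "ref".toList, "etrs".toList] : List (List Char)).contains (PySem.Chars.lower item) <;>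
      cases PySem.Chars.strIsdigit (PySem.Chars.lower item) <;>
      cases decide (3 ≤ (PySem.Chars.lower item).length) <;> simp
  have hA2 : ∀ (acc : List String) (item : List Char),
      (PySem.Chars.splitOn item ['-']).foldl (fun acc item =>
        let item := PySem.Chars.lower item
        if !((["tif".toList, "aux".toList, "ref".toList, "etrs".toList] : List (List Char)).contains item) then
          if !(PySem.Chars.strIsdigit item) then
            if !(decide (item.length < 3)) then acc ++ [String.ofList item] else acc
          else acc
        else acc) acc
      = acc ++ (splitP (· == '-') item).flatMap pvEmit := by
    intro acc item
    rw [foldl_acc_flatMap pvEmit _ hA3, splitOn_single]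
  have hA1 : ∀ (acc : List String) (item : List Char),
      (PySem.Chars.splitOn item ['.']).foldl (fun acc item =>
        (PySem.Chars.splitOn item ['-']).foldl (fun acc item =>
          let item := PySem.Chars.lower item
          if !((["tif".toList, "aux".toList, "ref".toList, "etrs".toList] : List (List Char)).contains item) then
            if !(PySem.Chars.strIsdigit item) then
              if !(decide (item.length < 3)) then acc ++ [String.ofList item] else acc
            else acc
          else acc) acc) acc
      = acc ++ (splitP (· == '.') item).flatMap (fun j => (splitP (· == '-') j).flatMap pvEmit) := by
    intro acc item
    rw [foldl_acc_flatMap (fun j => (splitP (· == '-') j).flatMap pvEmit) _ hA2, splitOn_single]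
  rw [foldl_acc_flatMap
        (fun i => (splitP (· == '.') i).flatMap (fun j => (splitP (· == '-') j).flatMap pvEmit)) _ hA1,
      splitOn_single]
  rw [List.nil_append]
  have h1 : ∀ i : List Char, (splitP (· == '.') i).flatMap (fun j => (splitP (· == '-') j).flatMap pvEmit)
      = (splitP (fun c => (c == '.') || (c == '-')) i).flatMap pvEmit := by
    intro i
    rw [← List.flatMap_assoc, splitP_flatMap]
  simp only [h1]
  rw [← List.flatMap_assoc, splitP_flatMap]
  rfl

-- B's scan invariant
lemma B_loop (cs : List Char) : ∀ (out : List String) (buf : List Char),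
    (∀ c ∈ buf, pvDelim c = false) →
    ((cs ++ ['_']).foldl (fun (st : List String × List Char) ch =>
       if pvDelim ch then
         let tok := PySem.Chars.lower st.2
         (if !((["tif".toList, "aux".toList, "ref".toList, "etrs".toList] : List (List Char)).contains tok)
               && !(PySem.Chars.strIsdigit tok) && decide (3 ≤ tok.length)
            then st.1 ++ [String.ofList tok] else st.1, [])
       else (st.1, st.2 ++ [ch])) (out, buf)).1
      = out ++ (splitP pvDelim (buf ++ cs)).flatMap pvEmit := by
  induction cs with
  | nil =>
    intro out buf hfree
    rw [List.nil_append, List.append_nil, splitP_single_of_free buf hfree]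
    simp only [List.foldl_cons, List.foldl_nil]
    rw [if_pos (show pvDelim '_' = true from rfl)]
    simp only [List.flatMap_cons, List.flatMap_nil, List.append_nil]
    unfold pvEmit
    split_ifs <;> simp
  | cons c cs ih =>
    intro out buf hfree
    rw [List.cons_append, List.foldl_cons]
    simp only []
    split_ifs with hd hB
    · -- delimiter, token kept
      rw [ih _ [] (by simp), splitP_append_delim buf c cs hfree hd, List.flatMap_cons]
      unfold pvEmit
      rw [if_pos hB, List.append_assoc]
      simp
    · -- delimiter, token dropped
      rw [ih _ [] (by simp), splitP_append_delim buf c cs hfree hd, List.flatMap_cons]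
      unfold pvEmit
      rw [if_neg hB, List.nil_append]
      simp
    · -- ordinary character: extend the buffer
      rw [ih out (buf ++ [c]) (by
        intro x hx
        rcases List.mem_append.mp hx with h | h
        · exact hfree x h
        · simp at h; subst h; simpa using hd)]
      rw [List.append_assoc]
      rfl

-- ===== VERDICT (by name: the statement is the Claim_ definition above) =====
theorem search_catchwords_spec : Claim_equal_search_catchwords := by
  intro s _
  unfold Spec_search_catchwords
  rw [A_eq_flatMap]
  unfold search_catchwords_alt
  simp only [contains_eq_pvDelim]
  rw [B_loop s.toList [] [] (by simp)]
  simp
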